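-- pv_equiv track=rewrite | github.com/OpenSourceEBike/EBike_EScooter_modular_DIY | test_ble_jbdbms_micropython/main.py | frame_ok
-- ===== SOURCE A (Python) =====
-- def frame_ok(f):
--     if (not f) or (len(f) < 7) or (f[0] != 0xDD) or (f[-1] != 0x77): return False
--     recv = (f[-3] << 8) | f[-2]
--     n = len(f)
--     def ok(start, end_excl):
--         if end_excl <= start: return False
--         s = 0
--         for b in f[start:end_excl]:
--             s = (s + b) & 0xFFFF
--         calc = (0x10000 - s) & 0xFFFF
--         return calc == recv
--     for st in (0,1,2,3):
--         for en in (n-3, n-4):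
--             if ok(st, en): return True
--     return False
-- ===== SOURCE B (Python) =====
-- def frame_ok(f):
--     if (not f) or (len(f) < 7) or (f[0] != 0xDD) or (f[-1] != 0x77): return False
--     n = len(f)
--     recv = (f[-3] << 8) | f[-2]
--     P = [0]
--     for b in f:
--         P.append(P[-1] + b)
--     for st in (0, 1, 2, 3):
--         for en in (n - 3, n - 4):
--             if en > st and ((0x10000 - ((P[en] - P[st]) & 0xFFFF)) & 0xFFFF) == recv:
--                 return True
--     return False
-- ===== Notes on version B (the rewrite author's own statement) =====
-- stated objective: alternative
-- what changed: B builds a prefix-sum list in one pass and tests each of the eight (start,end) checksum ranges as a difference of two prefix sums, replacing A's per-range masked summation loops over slices.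
import Mathlib
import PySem

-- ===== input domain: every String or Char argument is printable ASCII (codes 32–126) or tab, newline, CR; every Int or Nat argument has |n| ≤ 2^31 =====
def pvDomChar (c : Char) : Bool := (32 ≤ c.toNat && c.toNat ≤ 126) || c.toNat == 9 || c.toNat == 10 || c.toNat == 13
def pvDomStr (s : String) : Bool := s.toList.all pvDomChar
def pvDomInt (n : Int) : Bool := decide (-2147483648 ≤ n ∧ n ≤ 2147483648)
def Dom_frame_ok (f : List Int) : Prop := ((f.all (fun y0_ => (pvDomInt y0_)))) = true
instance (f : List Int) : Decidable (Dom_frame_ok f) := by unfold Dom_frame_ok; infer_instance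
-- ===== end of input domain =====

-- B replaces A's eight per-range checksum loops by one prefix-sum pass (each range sum is a
-- difference of two prefix sums); header guards and iteration order are unchanged.

-- ===== PORT A =====
-- A's inner helper `ok(start, end_excl)`: masked running sum over the slice.
def frameOkA_ok (f : List Int) (recv : Int) (start endExcl : Int) : Bool :=
  if endExcl ≤ start then false
  else
    let s := (PySem.List.slice f (some start) (some endExcl)).foldl
      (fun s b => PySem.Int.band (s + b) 65535) 0
    let c := PySem.Int.band (65536 - s) 65535
    c == recv

def frame_ok (f : List Int) : Bool :=
  if f.isEmpty || decide (f.length < 7) || (PySem.List.pyGetD f 0 0 != 0xDD)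
      || (PySem.List.pyGetD f (-1) 0 != 0x77) then false
  else
    let recv := PySem.Int.bor (PySem.List.pyGetD f (-3) 0 <<< (8 : Nat)) (PySem.List.pyGetD f (-2) 0)
    let n : Int := (f.length : Int)
    [(0 : Int), 1, 2, 3].any fun st => [n - 3, n - 4].any fun en => frameOkA_ok f recv st en

-- ===== PORT B =====
def frame_ok_alt (f : List Int) : Bool :=
  if f.isEmpty || decide (f.length < 7) || (PySem.List.pyGetD f 0 0 != 0xDD)
      || (PySem.List.pyGetD f (-1) 0 != 0x77) then false
  else
    let n : Int := (f.length : Int)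
    let recv := PySem.Int.bor (PySem.List.pyGetD f (-3) 0 <<< (8 : Nat)) (PySem.List.pyGetD f (-2) 0)
    let P := f.foldl (fun acc b => acc ++ [PySem.List.pyGetD acc (-1) 0 + b]) [(0 : Int)]
    [(0 : Int), 1, 2, 3].any fun st => [n - 3, n - 4].any fun en =>
      decide (st < en) &&
        (PySem.Int.band
          (65536 - PySem.Int.band (PySem.List.pyGetD P en 0 - PySem.List.pyGetD P st 0) 65535)
          65535 == recv)

-- ===== PRECONDITION & SPEC =====
def Spec_frame_ok (f : List Int) (out : Bool) : Prop := out = frame_ok_alt f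
instance (f : List Int) (out : Bool) : Decidable (Spec_frame_ok f out) := by unfold Spec_frame_ok; infer_instance

-- ===== CLAIM (what is proved, stated in full; the proofs are below) =====
def Claim_equal_frame_ok : Prop := ∀ (f : List Int), Dom_frame_ok f → Spec_frame_ok f (frame_ok f)

-- ===== LEMMAS AND PROOFS =====

-- Python's `x & 0xFFFF` is `x mod 2^16`, also for negative x.
theorem pv_band_mask (a : Int) : PySem.Int.band a 65535 = a % 65536 := by
  unfold PySem.Int.band
  have h1 : ∀ n : Nat, n &&& 65535 = n % 65536 := by
    intro n; have := Nat.and_two_pow_sub_one_eq_mod n 16; norm_num at this; omega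
  have ht : Int.toNat 65535 = 65535 := rfl
  split_ifs with h h2 h2 <;> norm_num at *
  · rw [ht, h1]; omega
  · rw [ht, Nat.and_comm, h1]
    have := Nat.mod_lt ((-a).toNat - 1) (show 0 < 65536 by norm_num)
    omega

-- A's masked running sum equals the plain sum taken mod 2^16.
theorem pv_fold_mask (l : List Int) : ∀ (x : Int),
    l.foldl (fun s b => PySem.Int.band (s + b) 65535) (x % 65536) = (x + l.sum) % 65536 := by
  induction l with
  | nil => intro x; simp
  | cons b l ih =>
    intro x
    have h : PySem.Int.band (x % 65536 + b) 65535 = (x + b) % 65536 := by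
      rw [pv_band_mask]; omega
    simp only [List.foldl_cons, h, ih (x + b), List.sum_cons]
    ring_nf

-- the list of partial sums of l continuing from x
def pvPref : List Int → Int → List Int
  | [], _ => []
  | b :: l, x => (x + b) :: pvPref l (x + b)

theorem pv_foldP (l : List Int) : ∀ (acc : List Int) (x : Int),
    l.foldl (fun acc b => acc ++ [PySem.List.pyGetD acc (-1) 0 + b]) (acc ++ [x])
      = (acc ++ [x]) ++ pvPref l x := by
  induction l with
  | nil => intro acc x; simp [pvPref]
  | cons b l ih =>
    intro acc x
    have hg : PySem.List.pyGetD (acc ++ [x]) (-1) 0 = x := by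
      simp [PySem.List.pyGetD, PySem.List.pyGet?, PySem.List.pyIdx?]
    simp only [List.foldl_cons, hg, pvPref]
    have := ih (acc ++ [x]) (x + b)
    simp only [List.append_assoc, List.cons_append, List.nil_append] at this ⊢
    exact this

theorem pv_getP (l : List Int) : ∀ (x : Int) (e : Nat), e ≤ l.length →
    (x :: pvPref l x).getD e 0 = x + (l.take e).sum := by
  induction l with
  | nil =>
    intro x e he
    simp only [List.length_nil, Nat.le_zero] at he
    subst he; simp [pvPref]
  | cons b l ih =>
    intro x e he
    cases e with
    | zero => simp
    | succ e' =>
      simp only [pvPref, List.getD_cons_succ, List.take_succ_cons, List.sum_cons]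
      rw [ih (x + b) e' (by simpa using he)]
      ring

theorem pv_take_sub (f : List Int) (a b : Nat) (hab : a ≤ b) :
    ((f.drop a).take (b - a)).sum = (f.take b).sum - (f.take a).sum := by
  have : f.take b = f.take a ++ (f.drop a).take (b - a) := by
    rw [← List.take_add (l := f) (i := a) (j := b - a)]
    congr 1; omega
  rw [this, List.sum_append]; ring

-- the per-(st,en) check: A's sliced masked loop equals B's prefix-sum test
theorem pv_pair (f : List Int) (recv st en : Int) (hst : 0 ≤ st) (hen0 : 0 ≤ en)
    (hlen : en ≤ (f.length : Int)) :
    frameOkA_ok f recv st en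
      = (decide (st < en) &&
          (PySem.Int.band
            (65536 - PySem.Int.band
              (PySem.List.pyGetD (f.foldl (fun acc b => acc ++ [PySem.List.pyGetD acc (-1) 0 + b]) [(0 : Int)]) en 0
               - PySem.List.pyGetD (f.foldl (fun acc b => acc ++ [PySem.List.pyGetD acc (-1) 0 + b]) [(0 : Int)]) st 0)
              65535)
            65535 == recv)) := by
  by_cases hcmp : en ≤ st
  · rw [frameOkA_ok, if_pos hcmp, decide_eq_false (by omega), Bool.false_and]
  · push_neg at hcmp
    rw [frameOkA_ok, if_neg (by omega), decide_eq_true (by omega), Bool.true_and]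
    have hP : (f.foldl (fun acc b => acc ++ [PySem.List.pyGetD acc (-1) 0 + b]) [(0 : Int)])
        = (0 : Int) :: pvPref f 0 := by
      have := pv_foldP f [] 0
      simpa using this
    have hget : ∀ (k : Int), 0 ≤ k → k ≤ (f.length : Int) →
        PySem.List.pyGetD (f.foldl (fun acc b => acc ++ [PySem.List.pyGetD acc (-1) 0 + b]) [(0 : Int)]) k 0
          = (f.take k.toNat).sum := by
      intro k hk0 hkl
      rw [hP, show k = ((k.toNat : Nat) : Int) by omega, PySem.List.pyGetD_natCast,
        pv_getP f 0 k.toNat (by omega)]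
      rw [Int.toNat_natCast, zero_add]
    rw [hget en hen0 hlen, hget st hst (by omega)]
    have hslice : PySem.List.slice f (some st) (some en) = (f.drop st.toNat).take (en.toNat - st.toNat) :=
      PySem.List.slice_toNat f hst hen0
    have hsum : (PySem.List.slice f (some st) (some en)).sum
        = (f.take en.toNat).sum - (f.take st.toNat).sum := by
      rw [hslice]; exact pv_take_sub f st.toNat en.toNat (by omega)
    have hfold : (PySem.List.slice f (some st) (some en)).foldl
        (fun s b => PySem.Int.band (s + b) 65535) 0
        = ((f.take en.toNat).sum - (f.take st.toNat).sum) % 65536 := by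
      have h0 : (0 : Int) = (0 : Int) % 65536 := by norm_num
      rw [h0, pv_fold_mask (PySem.List.slice f (some st) (some en)) 0, hsum]
      norm_num
    rw [hfold]
    simp only [pv_band_mask]

-- ===== VERDICT (by name: the statement is the Claim_ definition above) =====
theorem frame_ok_spec : Claim_equal_frame_ok := by
  intro f _
  unfold Spec_frame_ok frame_ok frame_ok_alt
  by_cases hg : (f.isEmpty || decide (f.length < 7) || (PySem.List.pyGetD f 0 0 != 0xDD)
      || (PySem.List.pyGetD f (-1) 0 != 0x77)) = true
  · rw [if_pos hg, if_pos hg]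
  · rw [if_neg hg, if_neg hg]
    have h7 : 7 ≤ f.length := by
      by_contra hlt
      simp only [Bool.or_eq_true, decide_eq_true_eq] at hg
      push_neg at hg
      exact hg.1.2 (by omega)
    simp only [List.any_cons, List.any_nil, Bool.or_false]
    rw [pv_pair f _ 0 _ (by norm_num) (by omega) (by omega),
        pv_pair f _ 0 _ (by norm_num) (by omega) (by omega),
        pv_pair f _ 1 _ (by norm_num) (by omega) (by omega),
        pv_pair f _ 1 _ (by norm_num) (by omega) (by omega),
        pv_pair f _ 2 _ (by norm_num) (by omega) (by omega),
        pv_pair f _ 2 _ (by norm_num) (by omega) (by omega),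
        pv_pair f _ 3 _ (by norm_num) (by omega) (by omega),
        pv_pair f _ 3 _ (by norm_num) (by omega) (by omega)]
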